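-- pv_equiv track=rewrite | github.com/apoorvar5/Decipher_Columnar_Shift_and_Transposition_Shift | decrypt.py | frequent_chars
-- ===== SOURCE A (Python) =====
-- def frequent_chars(cipher_text):
--     frequency_map = {}
--
--     for alphabet in range(ord('A'), ord('Z')+1):
--         count = 0
--         alphabet = chr(alphabet)
--
--         for char in cipher_text:
--             if alphabet == char:
--                 count += 1
--
--         if count > 3:
--             frequency_map[alphabet] = count
--
--     return frequency_map
-- ===== SOURCE B (Python) =====
-- def frequent_chars(cipher_text):
--     counts = {}
--     for ch in cipher_text:
--         counts[ch] = counts.get(ch, 0) + 1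
--     return {c: counts[c] for c in sorted(counts) if 'A' <= c <= 'Z' and counts[c] > 3}
-- ===== Notes on version B (the rewrite author's own statement) =====
-- stated objective: faster
-- what changed: Instead of scanning the whole text once for each of the 26 letters A-Z, B counts all characters in a single pass into a dict and then emits the sorted distinct characters in the A-Z range with count > 3 (sorted order equals A's alphabet insertion order).
import Mathlib
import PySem

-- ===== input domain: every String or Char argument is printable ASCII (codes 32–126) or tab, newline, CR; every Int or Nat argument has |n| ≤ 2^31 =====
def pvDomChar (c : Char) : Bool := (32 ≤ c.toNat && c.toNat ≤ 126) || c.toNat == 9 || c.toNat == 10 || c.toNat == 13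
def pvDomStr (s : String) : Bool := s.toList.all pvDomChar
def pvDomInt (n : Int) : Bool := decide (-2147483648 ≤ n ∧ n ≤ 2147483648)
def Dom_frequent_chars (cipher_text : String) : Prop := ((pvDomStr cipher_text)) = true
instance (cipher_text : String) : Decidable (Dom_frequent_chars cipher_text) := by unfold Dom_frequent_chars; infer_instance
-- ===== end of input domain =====

-- B replaces A's 26 repeated scans of the text (one per alphabet letter) by one counting pass over the
-- text plus a sort of its distinct characters (objective: faster; same return value).

-- ===== PORT A =====
def frequent_chars (cipher_text : String) : List (String × Int) :=
  ((PySem.List.pyRange 65 91 1).foldl (fun fm a =>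
      let alphabet := Char.ofNat a.toNat   -- chr(a); exact for the codes 65..90 reached here
      let count := cipher_text.toList.foldl (fun c ch => if alphabet == ch then c + 1 else c) (0 : Int)
      if 3 < count then fm.insert (String.mk [alphabet]) count else fm)
    (PySem.Dict.empty)).items

-- ===== PORT B =====
def frequent_chars_alt (cipher_text : String) : List (String × Int) :=
  let counts := cipher_text.toList.foldl (fun d ch => d.insert ch (d.getD ch 0 + 1))
    (PySem.Dict.empty : PySem.Dict Char Int)
  ((PySem.List.sorted counts.keys (fun c => c) false).filter
      (fun c => decide ('A' ≤ c) && decide (c ≤ 'Z') && decide ((3 : Int) < counts.getD c 0))).map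
    (fun c => (String.mk [c], counts.getD c 0))

-- ===== PRECONDITION & SPEC =====
def Spec_frequent_chars (cipher_text : String) (out : List (String × Int)) : Prop := out = frequent_chars_alt cipher_text
instance (cipher_text : String) (out : List (String × Int)) : Decidable (Spec_frequent_chars cipher_text out) := by unfold Spec_frequent_chars; infer_instance

-- ===== CLAIM (what is proved, stated in full; the proofs are below) =====
def Claim_equal_frequent_chars : Prop := ∀ (cipher_text : String), Dom_frequent_chars cipher_text → Spec_frequent_chars cipher_text (frequent_chars cipher_text)

-- ===== LEMMAS AND PROOFS =====

-- the letters 'A'..'Z' in order, as A's outer loop produces them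
def pvAZ : List Char := ['A','B','C','D','E','F','G','H','I','J','K','L','M','N','O','P','Q','R','S','T','U','V','W','X','Y','Z']

theorem pv_mem_AZ (c : Char) : c ∈ pvAZ ↔ ('A' ≤ c ∧ c ≤ 'Z') := by
  constructor
  · intro h; fin_cases h <;> exact ⟨by decide, by decide⟩
  · rintro ⟨h1, h2⟩
    rw [Char.le_def] at h1 h2
    rw [UInt32.le_iff_toNat_le] at h1 h2
    have b1 : 65 ≤ c.toNat := h1
    have b2 : c.toNat ≤ 90 := h2
    interval_cases h : c.toNat <;> (rw [← Char.ofNat_toNat c, h]; decide)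

-- the inner counting loop of A is List.count
theorem pv_count_loop (l : List Char) (v : Char) (a : Int) :
    l.foldl (fun c ch => if v == ch then c + 1 else c) a = a + (l.count v : Int) := by
  induction l generalizing a with
  | nil => simp
  | cons x t ih =>
    simp only [List.foldl_cons]
    by_cases h : v = x
    · subst h; rw [if_pos (by simp), ih, List.count_cons_self]; push_cast; ring
    · rw [if_neg (by simpa using h), ih]; simp [List.count_cons]; exact fun e => h e.symm

-- a fold inserting under a condition is the fold over the filtered list
theorem pv_foldl_ite_insert (P : Int → Prop) [DecidablePred P] (K : Int → String) (V : Int → Int)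
    (l : List Int) (d : PySem.Dict String Int) :
    l.foldl (fun fm a => if P a then fm.insert (K a) (V a) else fm) d
      = (l.filter (fun a => decide (P a))).foldl (fun fm a => fm.insert (K a) (V a)) d := by
  induction l generalizing d with
  | nil => rfl
  | cons a t ih => by_cases h : P a <;> simp [h, ih]

-- A's result in closed form: the letters 'A'..'Z' with count > 3, in alphabet order
theorem pv_A_eq (s : String) :
    frequent_chars s =
      ((pvAZ.filter (fun c => decide ((3 : Int) < (s.toList.count c : Int)))).map
        (fun c => (String.mk [c], (s.toList.count c : Int)))) := by
  unfold frequent_chars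
  simp only [pv_count_loop, zero_add]
  rw [pv_foldl_ite_insert (fun a => (3 : Int) < (s.toList.count (Char.ofNat a.toNat) : Int))
        (fun a => String.mk [Char.ofNat a.toNat]) (fun a => (s.toList.count (Char.ofNat a.toNat) : Int))]
  rw [PySem.Dict.items_foldl_insert_fresh]
  · have hAZ : (PySem.List.pyRange 65 91 1).map (fun a => Char.ofNat a.toNat) = pvAZ := by decide
    rw [← hAZ, List.filter_map, List.map_map]
    have he : (PySem.Dict.empty : PySem.Dict String Int).items = [] := rfl
    rw [he, List.nil_append]
    rfl
  · intro a _; exact PySem.Dict.contains_empty _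
  · have : ((PySem.List.pyRange 65 91 1).map (fun a => String.mk [Char.ofNat a.toNat])).Nodup := by decide
    exact this.sublist (List.Sublist.map _ List.filter_sublist)

-- B's result in closed form: the sorted distinct characters, filtered the same way
theorem pv_B_eq (s : String) :
    frequent_chars_alt s =
      ((PySem.List.sorted (PySem.Set.ofList s.toList) (fun c => c) false).filter
          (fun c => decide ('A' ≤ c) && decide (c ≤ 'Z') && decide ((3 : Int) < (s.toList.count c : Int)))).map
        (fun c => (String.mk [c], (s.toList.count c : Int))) := by
  unfold frequent_chars_alt
  simp only [PySem.Dict.foldl_insert_getD_add_one_eq_counter, PySem.Dict.keys_counter,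
    PySem.Dict.getD_counter]

-- the two filtered character lists coincide: both are strictly increasing with the same members
theorem pv_lists_eq (s : String) :
    (pvAZ.filter (fun c => decide ((3 : Int) < (s.toList.count c : Int))))
      = ((PySem.List.sorted (PySem.Set.ofList s.toList) (fun c => c) false).filter
          (fun c => decide ('A' ≤ c) && decide (c ≤ 'Z') && decide ((3 : Int) < (s.toList.count c : Int)))) := by
  have p1 : (pvAZ.filter (fun c => decide ((3 : Int) < (s.toList.count c : Int)))).Pairwise (· < ·) :=
    List.Pairwise.filter _ (by decide)
  have p2 : ((PySem.List.sorted (PySem.Set.ofList s.toList) (fun c => c) false).filter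
      (fun c => decide ('A' ≤ c) && decide (c ≤ 'Z') && decide ((3 : Int) < (s.toList.count c : Int)))).Pairwise (· < ·) :=
    List.Pairwise.filter _ (PySem.List.sorted_ofList_pairwise_lt s.toList)
  refine List.eq_of_perm_of_sorted (fun a b _ _ hab hba => absurd hba (lt_asymm hab)) p1 p2 ?_
  rw [List.perm_ext_iff_of_nodup (p1.imp ne_of_lt) (p2.imp ne_of_lt)]
  intro c
  simp only [List.mem_filter, pv_mem_AZ, decide_eq_true_eq, Bool.and_eq_true,
    (PySem.List.sorted_perm _ _ _).mem_iff, PySem.Set.mem_ofList]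
  have hmem : (3 : Int) < (s.toList.count c : Int) → c ∈ s.toList :=
    fun h => List.count_pos_iff.mp (Int.natCast_pos.mp (by omega))
  tauto

theorem frequent_chars_agree (s : String) : frequent_chars s = frequent_chars_alt s := by
  rw [pv_A_eq, pv_B_eq, pv_lists_eq]

-- ===== VERDICT (by name: the statement is the Claim_ definition above) =====
theorem frequent_chars_spec : Claim_equal_frequent_chars := by
  intro s _
  unfold Spec_frequent_chars
  exact frequent_chars_agree s
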